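-- pv_equiv track=rewrite | github.com/milkshakeiii/simple_python_projects | google_captives_full.py | simple_tabular_totals
-- ===== SOURCE A (Python) =====
-- def simple_tabular_totals(n):
--
--     #the tabular method.  according to a simplified recursion,
--     #each n is the results of the previous n * n-1
--     #plus the results of the previous n + 1
--
--     totals_by_n = [[1], [0, 1]]
--
--     for tabled_n in range(2, n+1):
--         totals_by_n.append([0 for i in range(tabled_n+1)])
--         n_minus_one = totals_by_n[tabled_n-1]
--         for i in range(len(n_minus_one)):
--             totals_by_n[tabled_n][i] += n_minus_one[i] * (tabled_n - 1)
--             totals_by_n[tabled_n][i+1] += n_minus_one[i]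
--
--     return totals_by_n[n]
-- ===== SOURCE B (Python) =====
-- def _polyadd(p, q):
--     n = max(len(p), len(q))
--     return [(p[i] if i < len(p) else 0) + (q[i] if i < len(q) else 0) for i in range(n)]
--
--
-- def _polymul(p, q):
--     # Horner accumulation: result = sum_i p[i] * x^i * q, built from the top coefficient down.
--     r = []
--     for a in reversed(p):
--         r = _polyadd([a * c for c in q], [0] + r)
--     return r
--
--
-- def _prod(a, ln):
--     # coefficients of (x+a)(x+a+1)...(x+a+ln-1), ln >= 1, by divide and conquer
--     if ln == 1:
--         return [a, 1]
--     h = ln // 2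
--     return _polymul(_prod(a, h), _prod(a + h, ln - h))
--
--
-- def simple_tabular_totals(n):
--     if n <= 0:
--         return [1]
--     return _prod(0, n)
-- ===== Notes on version B (the rewrite author's own statement) =====
-- stated objective: alternative
-- what changed: Instead of tabulating every row 0..n of the Stirling-number table with an index-wise inner update loop, B computes only row n as the coefficient list of the product (x+0)(x+1)...(x+n-1) by balanced divide-and-conquer polynomial multiplication.
-- intended difference: For n = -1, A's negative list index wraps around and accidentally returns the row for n=1, [0, 1]; B returns [1] (the empty product), the natural value for non-positive n. — e.g. on simple_tabular_totals(-1): A returns [0, 1], B returns [1]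
import Mathlib
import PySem

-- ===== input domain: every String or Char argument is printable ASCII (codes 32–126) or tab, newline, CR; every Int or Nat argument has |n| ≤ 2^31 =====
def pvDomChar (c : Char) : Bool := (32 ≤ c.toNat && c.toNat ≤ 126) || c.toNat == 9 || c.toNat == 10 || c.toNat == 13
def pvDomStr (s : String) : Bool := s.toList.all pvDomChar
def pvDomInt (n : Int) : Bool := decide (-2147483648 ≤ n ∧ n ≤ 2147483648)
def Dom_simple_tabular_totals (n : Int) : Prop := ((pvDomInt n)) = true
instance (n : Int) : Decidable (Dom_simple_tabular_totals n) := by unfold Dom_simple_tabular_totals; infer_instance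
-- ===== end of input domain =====

-- B replaces A's full Stirling table by a balanced divide-and-conquer product of the linear
-- factors (x+0)...(x+n-1), computing only the requested row (alternative algorithm).


-- ===== PORT A =====
-- inner loop: 'for i in range(len(n_minus_one)): row[i] += prev[i]*(tn-1); row[i+1] += prev[i]'
def pvAInner (prev : List Int) (c : Int) (zero : List Int) : List Int :=
  (List.range prev.length).foldl
    (fun row i =>
      let r1 := row.set i (row.getD i 0 + prev.getD i 0 * c)
      r1.set (i + 1) (r1.getD (i + 1) 0 + prev.getD i 0))
    zero

def simple_tabular_totals (n : Int) : List Int :=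
  let table :=
    (PySem.List.pyRange 2 (n + 1) 1).foldl
      (fun t tn =>
        let prev := PySem.List.pyGetD t (tn - 1) []
        let zero := (PySem.List.pyRange 0 (tn + 1) 1).map (fun _ => (0 : Int))
        t ++ [pvAInner prev (tn - 1) zero])
      [[1], [0, 1]]
  PySem.List.pyGetD table n []

-- ===== PORT B =====
def pvPolyadd (p q : List Int) : List Int :=
  (List.range (max p.length q.length)).map (fun i => p.getD i 0 + q.getD i 0)

-- Horner accumulation over reversed p, as in Source B
def pvPolymul (p q : List Int) : List Int :=
  p.reverse.foldl (fun r a => pvPolyadd (q.map (fun c => a * c)) (0 :: r)) []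

-- coefficients of (x+a)...(x+a+ln-1); guard 'ln ≤ 1' only makes the recursion total (Source B: ln == 1)
def pvProd (a : Int) (ln : Nat) : List Int :=
  if ln ≤ 1 then [a, 1]
  else
    let h := ln / 2
    pvPolymul (pvProd a h) (pvProd (a + h) (ln - h))
termination_by ln
decreasing_by
  · exact Nat.div_lt_self (by omega) (by omega)
  · omega

def simple_tabular_totals_alt (n : Int) : List Int :=
  if n ≤ 0 then [1] else pvProd 0 n.toNat

-- ===== PRECONDITION & SPEC =====
-- Pre_ excludes n ≤ -3, where A raises IndexError on totals_by_n[n].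
def Pre_simple_tabular_totals (n : Int) : Prop := -2 ≤ n
instance (n : Int) : Decidable (Pre_simple_tabular_totals n) := by
  unfold Pre_simple_tabular_totals; infer_instance
def pvWitness_simple_tabular_totals : Int := (3)

-- For n = -1, A's negative list index wraps around and accidentally returns the row for n=1,
-- [0, 1]; B returns [1] (the empty product), the natural value for non-positive n.
def D_simple_tabular_totals (n : Int) : Prop := n = -1
instance (n : Int) : Decidable (D_simple_tabular_totals n) := by
  unfold D_simple_tabular_totals; infer_instance

def Spec_simple_tabular_totals (n : Int) (out : List Int) : Prop :=
  ¬ D_simple_tabular_totals n → out = simple_tabular_totals_alt n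
instance (n : Int) (out : List Int) : Decidable (Spec_simple_tabular_totals n out) := by
  unfold Spec_simple_tabular_totals; infer_instance

def pvDiffWitness_simple_tabular_totals : Int := (-1)
def pvDiffWitnessOut_simple_tabular_totals : (List Int) × (List Int) := ([0, 1], [1])

-- ===== CLAIM (what is proved, stated in full; the proofs are below) =====
def Claim_unchanged_simple_tabular_totals : Prop :=
  ∀ (n : Int), Dom_simple_tabular_totals n → Pre_simple_tabular_totals n →
    Spec_simple_tabular_totals n (simple_tabular_totals n)
def Claim_changed_simple_tabular_totals : Prop :=
  Dom_simple_tabular_totals (pvDiffWitness_simple_tabular_totals) ∧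
  Pre_simple_tabular_totals (pvDiffWitness_simple_tabular_totals) ∧
  D_simple_tabular_totals (pvDiffWitness_simple_tabular_totals) ∧
  simple_tabular_totals (pvDiffWitness_simple_tabular_totals) = pvDiffWitnessOut_simple_tabular_totals.1 ∧
  simple_tabular_totals_alt (pvDiffWitness_simple_tabular_totals) = pvDiffWitnessOut_simple_tabular_totals.2 ∧
  pvDiffWitnessOut_simple_tabular_totals.1 ≠ pvDiffWitnessOut_simple_tabular_totals.2
def Claim_exact_simple_tabular_totals : Prop :=
  ∀ (n : Int), Dom_simple_tabular_totals n → Pre_simple_tabular_totals n →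
    D_simple_tabular_totals n → simple_tabular_totals n ≠ simple_tabular_totals_alt n

-- ===== LEMMAS AND PROOFS =====

-- coefficient-list-to-polynomial bridge
noncomputable def pvToPoly (p : List Int) : Polynomial Int :=
  p.foldr (fun a q => Polynomial.C a + Polynomial.X * q) 0

theorem pvToPoly_cons (a : Int) (t : List Int) :
    pvToPoly (a :: t) = Polynomial.C a + Polynomial.X * pvToPoly t := rfl

theorem pvToPoly_coeff (p : List Int) (j : Nat) : (pvToPoly p).coeff j = p.getD j 0 := by
  induction p generalizing j with
  | nil => simp [pvToPoly]
  | cons a t ih =>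
    cases j with
    | zero => simp [pvToPoly_cons]
    | succ j =>
      rw [pvToPoly_cons]
      simp only [Polynomial.coeff_add, Polynomial.coeff_X_mul, ih, Polynomial.coeff_C]
      simp

theorem pvToPoly_inj (p q : List Int) (hl : p.length = q.length)
    (hp : pvToPoly p = pvToPoly q) : p = q := by
  apply List.ext_getElem hl
  intro i h1 h2
  have := congrArg (fun r => Polynomial.coeff r i) hp
  simpa [pvToPoly_coeff, List.getD_eq_getElem, h1, h2] using this

theorem pvPolyadd_length (p q : List Int) :
    (pvPolyadd p q).length = max p.length q.length := by
  simp [pvPolyadd]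

theorem pvPolyadd_coeff (p q : List Int) :
    pvToPoly (pvPolyadd p q) = pvToPoly p + pvToPoly q := by
  apply Polynomial.ext; intro j
  by_cases h : j < max p.length q.length
  · simp [pvToPoly_coeff, pvPolyadd, List.getD, h]
  · have h1 : p.length ≤ j := by omega
    have h2 : q.length ≤ j := by omega
    simp [pvToPoly_coeff, pvPolyadd, h1, h2]

theorem pvToPoly_scale (a : Int) (q : List Int) :
    pvToPoly (q.map (fun c => a * c)) = Polynomial.C a * pvToPoly q := by
  induction q with
  | nil => simp [pvToPoly]
  | cons b t ih =>
    rw [List.map_cons, pvToPoly_cons, ih, pvToPoly_cons]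
    simp; ring

theorem pvToPoly_scale' (c : Int) (q : List Int) :
    pvToPoly (q.map (fun x => x * c)) = Polynomial.C c * pvToPoly q := by
  have : (fun x => x * c) = (fun x => c * x) := by funext x; ring
  rw [this, pvToPoly_scale]

theorem pvToPoly_shift (r : List Int) : pvToPoly (0 :: r) = Polynomial.X * pvToPoly r := by
  simp [pvToPoly]

theorem pvPolymul_foldr (p q : List Int) :
    pvPolymul p q = p.foldr (fun a r => pvPolyadd (q.map (fun c => a * c)) (0 :: r)) [] := by
  simp [pvPolymul, List.foldl_reverse]

theorem pvPolymul_spec (p q : List Int) :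
    pvToPoly (pvPolymul p q) = pvToPoly p * pvToPoly q := by
  rw [pvPolymul_foldr]
  induction p with
  | nil => simp [pvToPoly]
  | cons a t ih =>
    simp only [List.foldr_cons, pvPolyadd_coeff, pvToPoly_scale, pvToPoly_shift, ih]
    simp [pvToPoly]; ring

theorem pvPolymul_length (p q : List Int) (hp : p ≠ []) (hq : q ≠ []) :
    (pvPolymul p q).length = p.length + q.length - 1 := by
  rw [pvPolymul_foldr]
  have hq1 : 1 ≤ q.length := List.length_pos_iff.mpr hq
  induction p with
  | nil => exact absurd rfl hp
  | cons a t ih =>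
    cases t with
    | nil =>
      simp only [List.foldr_cons, List.foldr_nil, pvPolyadd_length, List.length_cons,
        List.length_map, List.length_nil]
      omega
    | cons b t' =>
      have h := ih (by simp)
      simp only [List.foldr_cons] at h ⊢
      simp only [pvPolyadd_length, List.length_cons, List.length_map] at h ⊢
      omega

theorem pvProd_spec (ln : Nat) (hln : 1 ≤ ln) (a : Int) :
    (pvProd a ln).length = ln + 1 ∧
    pvToPoly (pvProd a ln) =
      ∏ i ∈ Finset.range ln, (Polynomial.X + Polynomial.C (a + (i : Int))) := by
  induction ln using Nat.strong_induction_on generalizing a with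
  | _ ln ih =>
    by_cases h1 : ln ≤ 1
    · have : ln = 1 := by omega
      subst this
      rw [pvProd]
      refine ⟨by simp, ?_⟩
      simp [pvToPoly]; ring
    · rw [pvProd, if_neg h1]
      have hh1 : 1 ≤ ln / 2 := by omega
      have hh2 : ln / 2 < ln := by omega
      have hr1 : 1 ≤ ln - ln / 2 := by omega
      have hr2 : ln - ln / 2 < ln := by omega
      obtain ⟨l1, p1⟩ := ih (ln / 2) hh2 hh1 a
      obtain ⟨l2, p2⟩ := ih (ln - ln / 2) hr2 hr1 (a + (ln / 2 : Nat))
      constructor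
      · rw [pvPolymul_length _ _ (by intro h; rw [h] at l1; simp at l1)
              (by intro h; rw [h] at l2; simp at l2), l1, l2]
        omega
      · rw [pvPolymul_spec, p1, p2]
        have hsplit : ln = ln / 2 + (ln - ln / 2) := by omega
        conv_rhs => rw [hsplit, Finset.prod_range_add]
        congr 1
        apply Finset.prod_congr rfl
        intro i _
        congr 1
        push_cast
        ring

-- ===== A-side characterisation =====

-- the clean one-row recurrence A's table satisfies
def pvMulLin (c : Int) (p : List Int) : List Int :=
  pvPolyadd (p.map (fun x => x * c)) (0 :: p)

def pvRowS : Nat → List Int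
  | 0 => [1]
  | k + 1 => pvMulLin k (pvRowS k)

theorem pvMulLin_length (c : Int) (p : List Int) :
    (pvMulLin c p).length = p.length + 1 := by
  simp [pvMulLin, pvPolyadd_length]

theorem pvMulLin_spec (c : Int) (p : List Int) :
    pvToPoly (pvMulLin c p) = (Polynomial.X + Polynomial.C c) * pvToPoly p := by
  simp [pvMulLin, pvPolyadd_coeff, pvToPoly_scale', pvToPoly_shift]; ring

theorem pvRowS_length (k : Nat) : (pvRowS k).length = k + 1 := by
  induction k with
  | zero => rfl
  | succ k ih => simp [pvRowS, pvMulLin_length, ih]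

theorem pvRowS_spec (k : Nat) :
    pvToPoly (pvRowS k) = ∏ i ∈ Finset.range k, (Polynomial.X + Polynomial.C (i : Int)) := by
  induction k with
  | zero => simp [pvRowS, pvToPoly]
  | succ k ih =>
    rw [pvRowS, pvMulLin_spec, ih, Finset.prod_range_succ]
    ring

-- the partial state of A's inner loop after processing indices < m
def pvPartial (prev : List Int) (c : Int) (m len : Nat) : List Int :=
  (List.range len).map (fun j =>
    (if j < m then prev.getD j 0 * c else 0) +
    (if j ≤ m ∧ j ≠ 0 then prev.getD (j - 1) 0 else 0))

theorem pvPartial_length (prev : List Int) (c : Int) (m len : Nat) :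
    (pvPartial prev c m len).length = len := by simp [pvPartial]

theorem pvPartial_getElem (prev : List Int) (c : Int) (m len j : Nat) (hj : j < len) :
    (pvPartial prev c m len)[j]'(by simp [pvPartial_length, hj]) =
    (if j < m then prev.getD j 0 * c else 0) +
    (if j ≤ m ∧ j ≠ 0 then prev.getD (j - 1) 0 else 0) := by
  simp [pvPartial]

theorem pvAInner_partial (prev : List Int) (c : Int) (m : Nat)
    (hm : m ≤ prev.length) :
    (List.range m).foldl
      (fun row i =>
        let r1 := row.set i (row.getD i 0 + prev.getD i 0 * c)
        r1.set (i + 1) (r1.getD (i + 1) 0 + prev.getD i 0))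
      (pvPartial prev c 0 (prev.length + 1)) =
    pvPartial prev c m (prev.length + 1) := by
  induction m with
  | zero => simp
  | succ m ih =>
    rw [List.range_succ, List.foldl_append, ih (by omega)]
    simp only [List.foldl_cons, List.foldl_nil]
    set L := prev.length with hL
    have hmL : m < L := by omega
    apply List.ext_getElem
    · simp [pvPartial_length]
    · intro j h1 h2
      have hj : j < L + 1 := by simpa [pvPartial_length] using h2
      rw [List.getElem_set]
      by_cases hjm1 : m + 1 = j
      · subst hjm1
        rw [if_pos rfl,
          List.getD_eq_getElem _ _ (by simp [pvPartial_length]; omega),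
          List.getElem_set, if_neg (by omega),
          pvPartial_getElem _ _ _ _ _ (by omega),
          pvPartial_getElem _ _ _ _ _ (by omega)]
        rw [if_neg (by omega : ¬ (m + 1 < m)), if_neg (by omega : ¬ (m + 1 ≤ m ∧ m + 1 ≠ 0)),
          if_neg (by omega : ¬ (m + 1 < m + 1)), if_pos (by omega : m + 1 ≤ m + 1 ∧ m + 1 ≠ 0)]
        simp
      · rw [if_neg hjm1, List.getElem_set]
        by_cases hjm : m = j
        · subst hjm
          rw [if_pos rfl,
            List.getD_eq_getElem _ _ (by simp [pvPartial_length]; omega),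
            pvPartial_getElem _ _ _ _ _ (by omega),
            pvPartial_getElem _ _ _ _ _ (by omega)]
          rw [if_neg (by omega : ¬ (m < m)), if_pos (by omega : m < m + 1)]
          by_cases h0 : m = 0
          · subst h0; simp
          · rw [if_pos (by omega : m ≤ m ∧ m ≠ 0), if_pos (by omega : m ≤ m + 1 ∧ m ≠ 0)]
            ring
        · rw [if_neg hjm, pvPartial_getElem _ _ _ _ _ hj, pvPartial_getElem _ _ _ _ _ hj,
            if_congr (by omega : (j < m) ↔ (j < m + 1)) rfl rfl,
            if_congr (by omega : (j ≤ m ∧ j ≠ 0) ↔ (j ≤ m + 1 ∧ j ≠ 0)) rfl rfl]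

theorem pvZero_eq_partial (prev : List Int) (c : Int) (len : Nat) :
    List.replicate len (0 : Int) = pvPartial prev c 0 len := by
  apply List.ext_getElem
  · simp [pvPartial_length]
  · intro j h1 h2
    rw [pvPartial_getElem _ _ _ _ _ (by simpa using h1)]
    simp

theorem pvAInner_eq_mulLin (prev : List Int) (c : Int) :
    pvAInner prev c (List.replicate (prev.length + 1) 0) = pvMulLin c prev := by
  unfold pvAInner
  rw [pvZero_eq_partial prev c, pvAInner_partial prev c prev.length le_rfl]
  apply List.ext_getElem
  · simp [pvPartial_length, pvMulLin_length]
  · intro j h1 h2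
    have hj : j < prev.length + 1 := by simpa [pvPartial_length] using h1
    rw [pvPartial_getElem _ _ _ _ _ hj]
    have hrhs : (pvMulLin c prev)[j]'h2 =
        (prev.map (fun x => x * c)).getD j 0 + ((0 :: prev).getD j 0) := by
      unfold pvMulLin pvPolyadd
      simp only [List.getElem_map, List.getElem_range]
    rw [hrhs]
    congr 1
    · by_cases hjl : j < prev.length
      · rw [if_pos hjl,
          List.getD_eq_getElem (prev.map (fun x => x * c)) 0 (by simpa using hjl),
          List.getElem_map, List.getD_eq_getElem prev 0 hjl]
      · rw [if_neg hjl,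
          List.getD_eq_default (prev.map (fun x => x * c)) 0 (by simpa using le_of_not_gt hjl)]
    · cases j with
      | zero => simp
      | succ k =>
        rw [if_pos (by omega : k + 1 ≤ prev.length ∧ k + 1 ≠ 0), List.getD_cons_succ]
        simp

-- ===== top-level assembly =====

theorem pvTable_eq (m : Nat) (hm : 1 ≤ m) :
    (PySem.List.pyRange 2 ((m : Int) + 1) 1).foldl
      (fun t tn =>
        let prev := PySem.List.pyGetD t (tn - 1) []
        let zero := (PySem.List.pyRange 0 (tn + 1) 1).map (fun _ => (0 : Int))
        t ++ [pvAInner prev (tn - 1) zero])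
      [[1], [0, 1]] = (List.range (m + 1)).map pvRowS := by
  induction m, hm using Nat.le_induction with
  | base =>
    rw [PySem.List.pyRange_one_eq_nil (by norm_num)]
    decide
  | succ m hm ih =>
    have hcast : ((m + 1 : Nat) : Int) + 1 = ((m : Int) + 1) + 1 := by push_cast; ring_nf
    rw [hcast, PySem.List.pyRange_one_succ_right (by omega), List.foldl_append, ih]
    simp only [List.foldl_cons, List.foldl_nil]
    have e1 : ((m : Int) + 1) - 1 = ((m : Nat) : Int) := by omega
    rw [e1, PySem.List.pyGetD_natCast,
      List.getD_eq_getElem _ _ (by simp), List.getElem_map, List.getElem_range]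
    have e2 : (PySem.List.pyRange 0 (((m : Int) + 1) + 1) 1).map (fun _ => (0 : Int)) =
        List.replicate ((pvRowS m).length + 1) 0 := by
      rw [PySem.List.pyRange_one, List.map_map, pvRowS_length]
      apply List.ext_getElem
      · simp; omega
      · intro i h1 h2
        simp
    rw [e2, pvAInner_eq_mulLin]
    rw [show List.range (m + 1 + 1) = List.range (m + 1) ++ [m + 1] from List.range_succ,
      List.map_append]
    rfl

theorem pvA_eq_rowS (n : Int) (hn : 1 ≤ n) :
    simple_tabular_totals n = pvRowS n.toNat := by
  obtain ⟨k, rfl⟩ : ∃ k : Nat, n = (k : Int) := ⟨n.toNat, by omega⟩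
  have hk : 1 ≤ k := by omega
  unfold simple_tabular_totals
  rw [pvTable_eq k hk, PySem.List.pyGetD_natCast,
    List.getD_eq_getElem _ _ (by simp), List.getElem_map, List.getElem_range]
  simp

theorem pvRowS_eq_prod (k : Nat) (hk : 1 ≤ k) : pvRowS k = pvProd 0 k := by
  obtain ⟨l2, p2⟩ := pvProd_spec k hk 0
  apply pvToPoly_inj _ _ (by rw [pvRowS_length, l2])
  rw [pvRowS_spec, p2]
  apply Finset.prod_congr rfl
  intro i _
  simp

-- ===== VERDICT (by name: the statement is the Claim_ definition above) =====
theorem simple_tabular_totals_spec : Claim_unchanged_simple_tabular_totals := by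
  intro n hdom hpre hnd
  by_cases h1 : 1 ≤ n
  · rw [pvA_eq_rowS n h1, pvRowS_eq_prod n.toNat (by omega)]
    unfold simple_tabular_totals_alt
    rw [if_neg (by omega)]
  · unfold Pre_simple_tabular_totals at hpre
    unfold D_simple_tabular_totals at hnd
    interval_cases n
    · decide
    · exact absurd rfl hnd
    · decide

theorem simple_tabular_totals_changed : Claim_changed_simple_tabular_totals := by
  unfold Claim_changed_simple_tabular_totals; decide

theorem simple_tabular_totals_tight : Claim_exact_simple_tabular_totals := by
  intro n _ _ hd
  unfold D_simple_tabular_totals at hd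
  subst hd
  decide
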